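-- pv_equiv track=rewrite | github.com/Dimon228322228/itmo | sem2/opd/lab3/utils/tex_table.py | count_rows_for_comment
-- ===== SOURCE A (Python) =====
-- def count_rows_for_comment(comments):
--   rows_for_comment = []
--   first_comment = next(c for c in comments if c)
--   shrinked_comments = comments[comments.index(first_comment)+1:]
--   rows = 1
--   for comment in shrinked_comments:
--     if not comment:
--       rows += 1
--       continue
--     rows_for_comment.append(rows)
--     rows = 1
--   rows_for_comment.append(rows)
--
--   return rows_for_comment
-- ===== SOURCE B (Python) =====
-- def count_rows_for_comment(comments):
--     positions = [i for i, c in enumerate(comments) if c]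
--     return [b - a for a, b in zip(positions, positions[1:] + [len(comments)])]
-- ===== Notes on version B (the rewrite author's own statement) =====
-- stated objective: alternative
-- what changed: Replaces A's single running-counter scan (counter reset and flushed on each non-empty comment) by a two-stage decomposition: first collect the indices of the non-empty comments via enumerate+filter, then return the successive differences of that index list with len(comments) appended.
-- outside the precondition, e.g. on count_rows_for_comment([]): A raises StopIteration, B returns []
-- crash fix: On inputs with no non-empty comment (including []) A raises StopIteration from next(); B returns []. — e.g. on count_rows_for_comment(["", ""]): A raises StopIteration, B returns []
import Mathlib
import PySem

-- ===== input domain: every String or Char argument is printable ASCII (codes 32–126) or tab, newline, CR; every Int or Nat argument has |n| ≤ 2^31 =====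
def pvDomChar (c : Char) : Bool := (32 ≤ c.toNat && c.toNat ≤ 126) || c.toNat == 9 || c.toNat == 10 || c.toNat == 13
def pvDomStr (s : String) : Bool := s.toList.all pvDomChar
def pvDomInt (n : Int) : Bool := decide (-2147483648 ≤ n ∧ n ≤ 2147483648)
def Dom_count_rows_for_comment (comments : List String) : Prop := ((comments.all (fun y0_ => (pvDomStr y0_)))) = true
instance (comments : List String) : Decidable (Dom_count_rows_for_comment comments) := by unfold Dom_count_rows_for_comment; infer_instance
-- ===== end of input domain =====

-- B replaces A's running-counter-with-reset scan by a two-stage decomposition: first collect the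
-- indices of non-empty comments (enumerate+filter), then take successive differences (with the
-- list length appended); objective: alternative (same O(n) cost, different maintained state).
-- Where A raises StopIteration (no non-empty comment) B returns [] (see Raises_ block).


-- ===== PORT A =====
-- the loop body of A: state = (rows_for_comment, rows)
def pvAStep (st : List Int × Int) (comment : String) : List Int × Int :=
  if comment = "" then (st.1, st.2 + 1) else (st.1 ++ [st.2], (1 : Int))

def count_rows_for_comment (comments : List String) : List Int :=
  match comments.find? (fun c => c != "") with
  | none => []        -- next(...) raises StopIteration here; excluded by Pre_
  | some first_comment =>
    match PySem.List.index? comments first_comment with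
    | none => []      -- unreachable: first_comment ∈ comments
    | some idx =>
      let shrinked_comments := PySem.List.slice comments (some ((idx : Int) + 1)) none
      let st := shrinked_comments.foldl pvAStep ([], 1)
      st.1 ++ [st.2]

-- ===== PORT B =====
-- positions = [i for i, c in enumerate(comments) if c]
-- return [b - a for a, b in zip(positions, positions[1:] + [len(comments)])]
def count_rows_for_comment_alt (comments : List String) : List Int :=
  let positions := ((PySem.List.enumerate comments 0).filter (fun ic => ic.2 != "")).map (fun ic => ic.1)
  List.zipWith (fun a b => b - a) positions (positions.drop 1 ++ [(comments.length : Int)])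

-- ===== PRECONDITION & SPEC =====
-- Pre_ excludes exactly the inputs with no non-empty string, where A raises StopIteration.
def Pre_count_rows_for_comment (comments : List String) : Prop := ∃ c ∈ comments, c ≠ ""
instance (comments : List String) : Decidable (Pre_count_rows_for_comment comments) := by unfold Pre_count_rows_for_comment; infer_instance
def pvWitness_count_rows_for_comment : List String := ["x", "", "y"]

-- A raises StopIteration when every comment is empty (or the list is empty); B returns [] there.
def Raises_count_rows_for_comment (comments : List String) : Prop := ∀ c ∈ comments, c = ""
instance (comments : List String) : Decidable (Raises_count_rows_for_comment comments) := by unfold Raises_count_rows_for_comment; infer_instance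
def pvRaiseWitness_count_rows_for_comment : List String := ["", ""]
def pvRaiseWitnessOut_count_rows_for_comment : List Int := []

def Spec_count_rows_for_comment (comments : List String) (out : List Int) : Prop := out = count_rows_for_comment_alt comments
instance (comments : List String) (out : List Int) : Decidable (Spec_count_rows_for_comment comments out) := by unfold Spec_count_rows_for_comment; infer_instance

-- ===== CLAIM (what is proved, stated in full; the proofs are below) =====
def Claim_equal_count_rows_for_comment : Prop := ∀ (comments : List String), Dom_count_rows_for_comment comments → Pre_count_rows_for_comment comments → Spec_count_rows_for_comment comments (count_rows_for_comment comments)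
def Claim_raises_count_rows_for_comment : Prop := (∀ (comments : List String), Dom_count_rows_for_comment comments → Raises_count_rows_for_comment comments → ¬ Pre_count_rows_for_comment comments) ∧ (Dom_count_rows_for_comment (pvRaiseWitness_count_rows_for_comment) ∧ Raises_count_rows_for_comment (pvRaiseWitness_count_rows_for_comment) ∧ count_rows_for_comment_alt (pvRaiseWitness_count_rows_for_comment) = pvRaiseWitnessOut_count_rows_for_comment)

-- ===== LEMMAS AND PROOFS =====

-- the (Int-indexed) positions of the non-empty strings of l, starting at offset o
def pvPos (o : Int) : List String → List Int
  | [] => []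
  | c :: cs => if c = "" then pvPos (o + 1) cs else o :: pvPos (o + 1) cs

theorem pvStepA_empty (st : List Int × Int) : pvAStep st "" = (st.1, st.2 + 1) := by
  simp [pvAStep]

theorem pvStepA_ne (st : List Int × Int) (c : String) (hc : c ≠ "") :
    pvAStep st c = (st.1 ++ [st.2], 1) := by simp [pvAStep, hc]

theorem pvPos_cons_empty (o : Int) (cs : List String) :
    pvPos o ("" :: cs) = pvPos (o + 1) cs := by simp [pvPos]

theorem pvPos_cons_ne (o : Int) (c : String) (cs : List String) (hc : c ≠ "") :
    pvPos o (c :: cs) = o :: pvPos (o + 1) cs := by simp [pvPos, hc]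

theorem pvPos_eq_filter (l : List String) (o : Int) :
    ((PySem.List.enumerate l o).filter (fun ic => ic.2 != "")).map (fun ic => ic.1) = pvPos o l := by
  induction l generalizing o with
  | nil => simp [PySem.List.enumerate_nil, pvPos]
  | cons c cs ih =>
    by_cases hc : c = "" <;>
      simp [PySem.List.enumerate_cons, hc, pvPos, ih]

theorem pvPos_shift (l : List String) (o : Int) :
    pvPos (o + 1) l = (pvPos o l).map (fun x => x + 1) := by
  induction l generalizing o with
  | nil => simp [pvPos]
  | cons x xs ihx =>
    by_cases hx : x = "" <;> simp [pvPos, hx, ihx (o + 1), ihx o]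

-- main invariant: A's fold over l (rows = o - prev) yields the successive differences of
-- prev :: pvPos o l against pvPos o l ++ [o + |l|]
theorem pv_fold_diff (l : List String) (acc : List Int) (o prev : Int) :
    ((l.foldl pvAStep (acc, o - prev)).1 ++ [(l.foldl pvAStep (acc, o - prev)).2]) =
      acc ++ List.zipWith (fun a b => b - a) (prev :: pvPos o l) (pvPos o l ++ [o + l.length]) := by
  induction l generalizing acc o prev with
  | nil => simp [pvPos]
  | cons c cs ih =>
    have hl : (((c :: cs).length : Nat) : Int) = (cs.length : Int) + 1 := by
      push_cast [List.length_cons]; ring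
    by_cases hc : c = ""
    · subst hc
      rw [List.foldl_cons, pvStepA_empty, pvPos_cons_empty, hl,
          show o + ((cs.length : Int) + 1) = (o + 1) + (cs.length : Int) from by ring,
          show o - prev + 1 = (o + 1) - prev from by ring]
      exact ih acc (o + 1) prev
    · rw [List.foldl_cons, pvStepA_ne _ _ hc, pvPos_cons_ne _ _ _ hc, hl,
          show o + ((cs.length : Int) + 1) = (o + 1) + (cs.length : Int) from by ring,
          List.cons_append, List.zipWith_cons_cons]
      have := ih (acc ++ [o - prev]) (o + 1) o
      rw [show (o + 1) - o = (1 : Int) from by ring] at this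
      rw [this]
      simp

theorem count_rows_for_comment_spec : Claim_equal_count_rows_for_comment := by
  unfold Claim_equal_count_rows_for_comment
  intro comments hdom hpre
  unfold Spec_count_rows_for_comment
  induction comments with
  | nil => exact absurd hpre (by simp [Pre_count_rows_for_comment])
  | cons c cs ih =>
    by_cases hc : c = ""
    · -- head empty: both sides reduce to the tail case
      subst hc
      have hpre' : Pre_count_rows_for_comment cs := by
        obtain ⟨x, hx, hxne⟩ := hpre
        rcases List.mem_cons.mp hx with h | h
        · exact absurd h hxne
        · exact ⟨x, h, hxne⟩
      obtain ⟨fc, hfc⟩ : ∃ fc, cs.find? (fun c => c != "") = some fc := by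
        obtain ⟨x, hx, hxne⟩ := hpre'
        have : (cs.find? (fun c => c != "")).isSome := by
          rw [List.find?_isSome]; exact ⟨x, hx, by simpa using hxne⟩
        exact Option.isSome_iff_exists.mp this
      have hfcne : fc ≠ "" := by simpa using List.find?_some hfc
      obtain ⟨j, hj⟩ : ∃ j, PySem.List.index? cs fc = some j :=
        Option.isSome_iff_exists.mp ((PySem.List.index?_isSome_iff cs fc).mpr (List.mem_of_find?_eq_some hfc))
      have hfind : ("" :: cs).find? (fun c => c != "") = some fc := by
        rw [List.find?_cons_of_neg (by simp)]; exact hfc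
      have hcfc : ("" : String) ≠ fc := fun h => hfcne h.symm
      have hidx : PySem.List.index? ("" :: cs) fc = some (j + 1) := by
        rw [PySem.List.index?_cons_of_ne cs hcfc, hj]; rfl
      have hsliceA : PySem.List.slice ("" :: cs) (some ((((j + 1 : Nat)) : Int) + 1))
          = PySem.List.slice cs (some (((j : Nat) : Int) + 1)) := by
        rw [PySem.List.slice_from ("" :: cs) (by omega), PySem.List.slice_from cs (by omega)]
        have h1 : ((((j + 1 : Nat)) : Int) + 1).toNat = (j + 1) + 1 := by omega
        have h2 : ((((j : Nat)) : Int) + 1).toNat = j + 1 := by omega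
        rw [h1, h2, List.drop_succ_cons]
      -- B side: stripping the leading "" shifts every position by one, which cancels in differences
      have hBalt : count_rows_for_comment_alt ("" :: cs) = count_rows_for_comment_alt cs := by
        unfold count_rows_for_comment_alt
        rw [pvPos_eq_filter, pvPos_eq_filter, pvPos_cons_empty, pvPos_shift]
        have hl : ((("" :: cs).length : Nat) : Int) = (cs.length : Int) + 1 := by
          push_cast [List.length_cons]; ring
        rw [hl]
        show List.zipWith (fun a b => b - a) ((pvPos 0 cs).map (fun x => x + 1))
            (((pvPos 0 cs).map (fun x => x + 1)).drop 1 ++ [(cs.length : Int) + 1])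
          = List.zipWith (fun a b => b - a) (pvPos 0 cs) ((pvPos 0 cs).drop 1 ++ [(cs.length : Int)])
        have hdrop : ((pvPos 0 cs).map (fun x => x + 1)).drop 1 = ((pvPos 0 cs).drop 1).map (fun x => x + 1) := by
          cases pvPos 0 cs <;> simp
        rw [hdrop]
        have happ : ((pvPos 0 cs).drop 1).map (fun x => x + 1) ++ [(cs.length : Int) + 1]
            = (((pvPos 0 cs).drop 1) ++ [(cs.length : Int)]).map (fun x => x + 1) := by simp
        rw [happ, List.zipWith_map]
        have hfun : (fun (a b : Int) => (b + 1) - (a + 1)) = fun (a b : Int) => b - a := by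
          funext a b; ring
        rw [hfun]
      rw [hBalt]
      simp only [count_rows_for_comment, hfind, hidx, hsliceA]
      simp only [count_rows_for_comment, hfc, hj] at ih
      have hdom' : Dom_count_rows_for_comment cs := by
        unfold Dom_count_rows_for_comment at hdom ⊢; simp_all
      exact ih hdom' hpre'
    · -- head non-empty: index 0, the fold invariant finishes
      have hfind : (c :: cs).find? (fun c => c != "") = some c :=
        List.find?_cons_of_pos (by simpa using hc)
      have hidx : PySem.List.index? (c :: cs) c = some 0 := PySem.List.index?_cons_self c cs
      have hA : PySem.List.slice (c :: cs) (some (((0 : Nat) : Int) + 1)) = cs := by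
        rw [PySem.List.slice_from (c :: cs) (by omega)]; simp
      simp only [count_rows_for_comment, hfind, hidx, hA]
      unfold count_rows_for_comment_alt
      rw [pvPos_eq_filter, pvPos_cons_ne _ _ _ hc]
      have hl : (((c :: cs).length : Nat) : Int) = 1 + (cs.length : Int) := by
        push_cast [List.length_cons]; ring
      rw [hl]
      have := pv_fold_diff cs [] 1 0
      rw [show (1 : Int) - 0 = 1 from by ring] at this
      rw [this]
      simp

@[simp]
theorem count_rows_for_comment_raises : Claim_raises_count_rows_for_comment := by
  unfold Claim_raises_count_rows_for_comment
  constructor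
  · intro comments _ hr hpre
    obtain ⟨x, hx, hxne⟩ := hpre
    exact hxne (hr x hx)
  · exact ⟨by decide, by decide, by decide⟩
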